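-- pv_equiv track=rewrite | github.com/jitender18/leetcode-python | Perform String Shifts.py | stringRotation
-- ===== SOURCE A (Python) =====
-- from typing import List
--
-- def stringRotation(s: str, rotation: List[List[int]]) -> str:
--     left = 0
--     for d, a in rotation:
--         if d:
--             left -= a
--         else:
--             left += a
--     left %= len(s)
--     return s[left:] + s[:left]
-- ===== SOURCE B (Python) =====
-- def stringRotation(s, rotation):
--     n = len(s)
--     result = s
--     for d, a in rotation:
--         k = a % n
--         if d:
--             result = result[n - k:] + result[:n - k]
--         else:
--             result = result[k:] + result[:k]
--     return result
-- ===== Notes on version B (the rewrite author's own statement) =====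
-- stated objective: alternative
-- what changed: Instead of summing all signed offsets and slicing once at the end, B simulates the rotations step by step, applying each shift as an actual slice rotation of the running string.
import Mathlib
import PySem

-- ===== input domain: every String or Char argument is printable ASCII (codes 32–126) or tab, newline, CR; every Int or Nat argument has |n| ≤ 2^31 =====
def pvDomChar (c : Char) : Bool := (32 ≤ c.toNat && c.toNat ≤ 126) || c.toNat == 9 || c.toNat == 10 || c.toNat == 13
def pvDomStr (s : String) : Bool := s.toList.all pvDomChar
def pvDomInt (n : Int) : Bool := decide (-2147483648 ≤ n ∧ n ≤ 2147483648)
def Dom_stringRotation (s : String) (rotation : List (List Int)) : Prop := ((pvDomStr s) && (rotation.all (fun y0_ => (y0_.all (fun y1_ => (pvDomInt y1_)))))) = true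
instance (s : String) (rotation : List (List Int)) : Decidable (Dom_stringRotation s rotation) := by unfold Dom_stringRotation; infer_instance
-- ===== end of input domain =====

-- B simulates the shifts step by step (one slice rotation per operation) instead of
-- summing a single net offset and slicing once; alternative decomposition, not faster.


-- ===== PORT A =====
-- left = 0; for d, a in rotation: left ±= a; left %= len(s); return s[left:] + s[:left]
def stringRotation (s : String) (rotation : List (List Int)) : String :=
  let left : Int := rotation.foldl (fun left r =>
    match r with
    | d :: a :: _ => if d ≠ 0 then left - a else left + a
    | _ => left) 0
  let left : Int := PySem.Int.mod left (s.toList.length : Int)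
  String.ofList (PySem.List.slice s.toList (some left) none ++ PySem.List.slice s.toList none (some left))

-- ===== PORT B =====
-- n = len(s); result = s; per operation rotate result by a % n (left) or n - a % n (right)
def stringRotation_alt (s : String) (rotation : List (List Int)) : String :=
  let n : Int := (s.toList.length : Int)
  let result : List Char := rotation.foldl (fun result r =>
    match r.head?, r.tail.head? with
    | some d, some a =>
      let k : Int := PySem.Int.mod a n
      if d ≠ 0 then
        PySem.List.slice result (some (n - k)) none ++ PySem.List.slice result none (some (n - k))
      else
        PySem.List.slice result (some k) none ++ PySem.List.slice result none (some k)
    | _, _ => result) s.toList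
  String.ofList result

-- ===== PRECONDITION & SPEC =====
-- Pre_ excludes exactly the inputs where A raises: the empty string (ZeroDivisionError on
-- `left %= len(s)`) and rows that are not length-2 pairs (ValueError on unpacking).
def Pre_stringRotation (s : String) (rotation : List (List Int)) : Prop :=
  s.toList ≠ [] ∧ ∀ r ∈ rotation, r.length = 2
instance (s : String) (rotation : List (List Int)) : Decidable (Pre_stringRotation s rotation) := by
  unfold Pre_stringRotation; infer_instance
def pvWitness_stringRotation : String × List (List Int) := ("abc", [[0, 1], [1, 3]])

def Spec_stringRotation (s : String) (rotation : List (List Int)) (out : String) : Prop := out = stringRotation_alt s rotation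
instance (s : String) (rotation : List (List Int)) (out : String) : Decidable (Spec_stringRotation s rotation out) := by unfold Spec_stringRotation; infer_instance

-- ===== CLAIM (what is proved, stated in full; the proofs are below) =====
def Claim_equal_stringRotation : Prop := ∀ (s : String) (rotation : List (List Int)), Dom_stringRotation s rotation → Pre_stringRotation s rotation → Spec_stringRotation s rotation (stringRotation s rotation)

-- ===== LEMMAS AND PROOFS =====

-- Modular arithmetic: composing per-step offsets equals the offset of the summed shift.
lemma mstep (n acc a : Int) :
    (acc % n + (n - a % n)) % n = (acc - a) % n := by
  have h1 : acc % n + (n - a % n) ≡ acc + (0 - a) [ZMOD n] :=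
    (Int.mod_modEq acc n).add (Int.modulus_modEq_zero.sub (Int.mod_modEq a n))
  simp only [zero_sub, ← sub_eq_add_neg] at h1
  exact h1

lemma pstep (n acc a : Int) :
    (acc % n + a % n) % n = (acc + a) % n :=
  (Int.mod_modEq acc n).add (Int.mod_modEq a n)

lemma natstep_sub (len : Nat) (hlen : 0 < len) (acc a : Int) :
    ((acc % (len:Int)).toNat + (((len:Int)) - a % (len:Int)).toNat) % len
      = ((acc - a) % (len:Int)).toNat % len := by
  have hn : (0:Int) < (len:Int) := by exact_mod_cast hlen
  have h1 : 0 ≤ acc % (len:Int) := Int.emod_nonneg _ (by omega)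
  have h3 : a % (len:Int) < len := Int.emod_lt_of_pos _ hn
  have h4 : 0 ≤ (acc - a) % (len:Int) := Int.emod_nonneg _ (by omega)
  have key := mstep (len:Int) acc a
  zify
  push_cast [Int.toNat_of_nonneg, h1, h4, Int.toNat_of_nonneg (by omega : (0:Int) ≤ (len:Int) - a % len)]
  rw [key, Int.emod_emod_of_dvd _ dvd_rfl]

lemma natstep_add (len : Nat) (hlen : 0 < len) (acc a : Int) :
    ((acc % (len:Int)).toNat + (a % (len:Int)).toNat) % len
      = ((acc + a) % (len:Int)).toNat % len := by
  have hn : (0:Int) < (len:Int) := by exact_mod_cast hlen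
  have h1 : 0 ≤ acc % (len:Int) := Int.emod_nonneg _ (by omega)
  have h2 : 0 ≤ a % (len:Int) := Int.emod_nonneg _ (by omega)
  have h4 : 0 ≤ (acc + a) % (len:Int) := Int.emod_nonneg _ (by omega)
  have key := pstep (len:Int) acc a
  zify
  push_cast [Int.toNat_of_nonneg, h1, h2, h4]
  rw [key, Int.emod_emod_of_dvd _ dvd_rfl]

-- One B-step on a rotation of xs is again a rotation of xs, with the offsets composing mod |xs|.
lemma rotate_step (xs : List Char) (m : Nat) (j : Int)
    (hj0 : 0 ≤ j) (hjn : j ≤ (xs.length : Int)) :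
    PySem.List.slice (xs.rotate m) (some j) none ++ PySem.List.slice (xs.rotate m) none (some j)
      = xs.rotate (m + j.toNat) := by
  rw [PySem.List.slice_from _ hj0, PySem.List.slice_to _ hj0]
  have hlen : (xs.rotate m).length = xs.length := List.length_rotate ..
  have hle : j.toNat ≤ (xs.rotate m).length := by rw [hlen]; omega
  rw [← List.rotate_eq_drop_append_take hle, List.rotate_rotate]

-- Loop invariant: B's fold over `rs`, started on `xs` rotated by A's partial offset,
-- ends on `xs` rotated by A's total offset (both taken mod |xs|).
lemma loop_inv (xs : List Char) (h : xs ≠ []) (rs : List (List Int)) (acc : Int) :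
    rs.foldl (fun result r =>
      match r.head?, r.tail.head? with
      | some d, some a =>
        let k : Int := PySem.Int.mod a (xs.length : Int)
        if d ≠ 0 then
          PySem.List.slice result (some ((xs.length : Int) - k)) none ++ PySem.List.slice result none (some ((xs.length : Int) - k))
        else
          PySem.List.slice result (some k) none ++ PySem.List.slice result none (some k)
      | _, _ => result) (xs.rotate (PySem.Int.mod acc (xs.length : Int)).toNat)
    = xs.rotate (PySem.Int.mod (rs.foldl (fun left r =>
        match r with
        | d :: a :: _ => if d ≠ 0 then left - a else left + a
        | _ => left) acc) (xs.length : Int)).toNat := by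
  induction rs generalizing acc with
  | nil => rfl
  | cons r rs ih =>
    have hn : 0 < (xs.length : Int) := by
      have := List.length_pos_iff.mpr h; omega
    match r with
    | [] => exact ih acc
    | [d] => exact ih acc
    | d :: a :: rest =>
      simp only [List.foldl_cons, List.head?_cons, List.tail_cons]
      have hk0 : 0 ≤ PySem.Int.mod a (xs.length : Int) := PySem.Int.mod_nonneg _ hn
      have hkn : PySem.Int.mod a (xs.length : Int) < (xs.length : Int) := PySem.Int.mod_lt _ hn
      by_cases hd : d ≠ 0
      · simp only [if_pos hd]
        rw [rotate_step xs _ _ (by omega) (by omega), ← ih (acc - a)]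
        rw [← List.rotate_mod, ← List.rotate_mod xs (PySem.Int.mod (acc - a) (xs.length : Int)).toNat]
        congr 2
        simp only [PySem.Int.mod_eq_emod_of_pos hn]
        exact natstep_sub xs.length (List.length_pos_iff.mpr h) acc a
      · simp only [if_neg hd]
        rw [rotate_step xs _ _ (by omega) (by omega), ← ih (acc + a)]
        rw [← List.rotate_mod, ← List.rotate_mod xs (PySem.Int.mod (acc + a) (xs.length : Int)).toNat]
        congr 2
        simp only [PySem.Int.mod_eq_emod_of_pos hn]
        exact natstep_add xs.length (List.length_pos_iff.mpr h) acc a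

-- ===== VERDICT (by name: the statement is the Claim_ definition above) =====
theorem stringRotation_spec : Claim_equal_stringRotation := by
  intro s rotation _ hpre
  obtain ⟨hs, -⟩ := hpre
  unfold Spec_stringRotation stringRotation stringRotation_alt
  have hn : 0 < (s.toList.length : Int) := by
    have := List.length_pos_iff.mpr hs; omega
  have h0 : PySem.Int.mod 0 (s.toList.length : Int) = 0 := by
    rw [PySem.Int.mod_eq_emod_of_pos hn]; simp
  have key := loop_inv s.toList hs rotation 0
  rw [h0] at key
  simp only [Int.toNat_zero, List.rotate_zero] at key
  simp only []
  rw [key]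
  set L := rotation.foldl (fun left r =>
    match r with
    | d :: a :: _ => if d ≠ 0 then left - a else left + a
    | _ => left) 0 with hL
  have hm0 : 0 ≤ PySem.Int.mod L (s.toList.length : Int) := PySem.Int.mod_nonneg _ hn
  have hmn : PySem.Int.mod L (s.toList.length : Int) < (s.toList.length : Int) := PySem.Int.mod_lt _ hn
  rw [PySem.List.slice_from _ hm0, PySem.List.slice_to _ hm0,
      ← List.rotate_eq_drop_append_take (by omega)]
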